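-- pv_equiv track=rewrite | github.com/mayavolo/ex6 | wave_editor.py | note_time_list
-- ===== SOURCE A (Python) =====
-- NOTE_TO_FREQ_MAPPING = {
--     'A': 440,
--     'B': 494,
--     'C': 523,
--     'D': 587,
--     'E': 659,
--     'F': 698,
--     'G': 784,
--     'Q': 0
-- }
--
-- def note_time_list(melody):
--     """
--     this function make a list of a note and a time (like 16 or 8)
--     :param melody: The string with the instructions for the melody
--     :return: The list
--     """
--
--     instructions = melody.split(' ')
--     instructions = [value for value in instructions if value != '']
--
--     pairs = list()  # A list of lists[[Note, Number],....]
--     pair = list()  # A single list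
--
--     if len(instructions) % 2:  # --> The list must be has an even length
--         return None
--
--     for i in range(len(instructions)):
--
--         value = instructions[i]
--
--         if not i % 2:
--             if value not in NOTE_TO_FREQ_MAPPING.keys() \
--                     or len(value) != 1:  # ----> it means we got incorrect instructions
--                 return None
--
--             pair.append(value)
--
--         else:
--             if not value.isdigit() \
--                     or int(value) <= 0:  # ----> it means we got incorrect instructions
--                 return None
--
--             pair.append(int(value))
--             pairs.append(pair)
--             pair = list()
--
--     return pairs
-- ===== SOURCE B (Python) =====
-- NOTE_TO_FREQ_MAPPING = {
--     'A': 440,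
--     'B': 494,
--     'C': 523,
--     'D': 587,
--     'E': 659,
--     'F': 698,
--     'G': 784,
--     'Q': 0
-- }
--
--
-- def note_time_list(melody):
--     tokens = [t for t in melody.split(' ') if t != '']
--     if len(tokens) % 2:
--         return None
--     it = iter(tokens)
--     chunks = list(zip(it, it))  # consecutive (note, duration) pairs
--     if not all(n in NOTE_TO_FREQ_MAPPING for n, _ in chunks):
--         return None
--     if not all(d.isdigit() and int(d) > 0 for _, d in chunks):
--         return None
--     return [[n, int(d)] for n, d in chunks]
-- ===== Notes on version B (the rewrite author's own statement) =====
-- stated objective: simpler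
-- what changed: Replaced A's single indexed loop with parity branching, a partial-pair accumulator and early returns by chunking the token list into (note, duration) pairs via zip over one iterator, validating all notes and all durations in two whole-list passes, and building the result with one comprehension.
import Mathlib
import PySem

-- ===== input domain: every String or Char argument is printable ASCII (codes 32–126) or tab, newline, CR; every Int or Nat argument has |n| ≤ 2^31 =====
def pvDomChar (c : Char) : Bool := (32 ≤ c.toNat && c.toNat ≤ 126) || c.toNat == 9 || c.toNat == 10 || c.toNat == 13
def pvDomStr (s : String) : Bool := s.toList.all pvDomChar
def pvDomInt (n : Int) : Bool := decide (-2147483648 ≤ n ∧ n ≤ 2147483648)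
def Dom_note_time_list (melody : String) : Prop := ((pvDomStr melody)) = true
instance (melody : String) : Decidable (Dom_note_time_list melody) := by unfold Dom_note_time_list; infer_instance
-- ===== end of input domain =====

-- B replaces A's indexed loop (parity branch, partial-pair accumulator, early returns) by chunking
-- the tokens into (note, duration) pairs and two whole-list validation passes; objective: simpler.

-- ===== PORT A =====
def NOTE_TO_FREQ_MAPPING : List (String × Int) :=
  [("A", 440), ("B", 494), ("C", 523), ("D", 587), ("E", 659), ("F", 698), ("G", 784), ("Q", 0)]

-- A's for-loop: state = (index i, pending pair, pairs accumulated so far)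
def noteTimeGo : List String → Nat → Option String → List (String × Int) → Option (List (String × Int))
  | [], _, _, pairs => some pairs
  | v :: rest, i, pair, pairs =>
    if i % 2 = 0 then
      if ¬ ((NOTE_TO_FREQ_MAPPING.map Prod.fst).contains v) ∨ PySem.Str.len v ≠ 1 then none
      else noteTimeGo rest (i + 1) (some v) pairs
    else
      if ¬ (PySem.Str.strIsdigit v) ∨ (PySem.Int.ofStr? v).getD 0 ≤ 0 then none
      else
        match pair with
        | some n => noteTimeGo rest (i + 1) none (pairs ++ [(n, (PySem.Int.ofStr? v).getD 0)])
        | none => none   -- unreachable: at odd i a note is always pending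

def note_time_list (melody : String) : Option (List (String × Int)) :=
  let instructions := ((PySem.Str.split? melody " ").getD []).filter (fun t => t ≠ "")
  if instructions.length % 2 ≠ 0 then none
  else noteTimeGo instructions 0 none []

-- ===== PORT B =====
-- list(zip(it, it)): consecutive (note, duration) chunks
def chunkPairs : List String → List (String × String)
  | n :: d :: rest => (n, d) :: chunkPairs rest
  | _ => []

def note_time_list_alt (melody : String) : Option (List (String × Int)) :=
  let tokens := ((PySem.Str.split? melody " ").getD []).filter (fun t => t ≠ "")
  if tokens.length % 2 ≠ 0 then none
  else
    let chunks := chunkPairs tokens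
    if ¬ (chunks.all fun p => NOTE_TO_FREQ_MAPPING.any fun kv => kv.1 == p.1) then none
    else if ¬ (chunks.all fun p => PySem.Str.strIsdigit p.2 && decide (0 < (PySem.Int.ofStr? p.2).getD 0)) then none
    else some (chunks.map fun p => (p.1, (PySem.Int.ofStr? p.2).getD 0))

-- ===== PRECONDITION & SPEC =====
def Spec_note_time_list (melody : String) (out : Option (List (String × Int))) : Prop := out = note_time_list_alt melody
instance (melody : String) (out : Option (List (String × Int))) : Decidable (Spec_note_time_list melody out) := by unfold Spec_note_time_list; infer_instance

-- ===== CLAIM (what is proved, stated in full; the proofs are below) =====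
def Claim_equal_note_time_list : Prop := ∀ (melody : String), Dom_note_time_list melody → Spec_note_time_list melody (note_time_list melody)

-- ===== LEMMAS AND PROOFS =====

-- every key of the mapping is a single character, so A's 'len(value) != 1' test is subsumed
theorem mem_keys_len (v : String) (h : ((NOTE_TO_FREQ_MAPPING.map Prod.fst).contains v) = true) :
    PySem.Str.len v = 1 := by
  simp only [NOTE_TO_FREQ_MAPPING, List.map, List.contains_cons, List.contains_nil,
    Bool.or_eq_true, beq_iff_eq] at h
  rcases h with rfl | rfl | rfl | rfl | rfl | rfl | rfl | rfl | h <;> first | rfl | simp at h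

-- A's 'value not in MAPPING.keys()' and B's 'n in MAPPING' are the same membership test
theorem contains_eq_any (v : String) :
    ((NOTE_TO_FREQ_MAPPING.map Prod.fst).contains v) = (NOTE_TO_FREQ_MAPPING.any fun kv => kv.1 == v) := by
  simp only [NOTE_TO_FREQ_MAPPING, List.map, List.contains_cons, List.contains_nil, List.any_cons,
    List.any_nil]
  simp [BEq.comm]

-- loop invariant: on an even-length token list, starting at an even index with no pending note,
-- A's loop computes exactly B's validate-then-build value (prefixed with the accumulator)
theorem noteTimeGo_eq (ts : List String) (hev : ts.length % 2 = 0)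
    (i : Nat) (hi : i % 2 = 0) (acc : List (String × Int)) :
    noteTimeGo ts i none acc =
      if ¬ ((chunkPairs ts).all fun p => NOTE_TO_FREQ_MAPPING.any fun kv => kv.1 == p.1) then none
      else if ¬ ((chunkPairs ts).all fun p =>
                  PySem.Str.strIsdigit p.2 && decide (0 < (PySem.Int.ofStr? p.2).getD 0)) then none
      else some (acc ++ (chunkPairs ts).map fun p => (p.1, (PySem.Int.ofStr? p.2).getD 0)) := by
  induction ts using chunkPairs.induct generalizing i acc with
  | case1 n d rest ih =>
    have hrest : rest.length % 2 = 0 := by simp only [List.length_cons] at hev; omega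
    have hi1 : ¬ ((i + 1) % 2 = 0) := by omega
    have hi2 : (i + 2) % 2 = 0 := by omega
    rw [show chunkPairs (n :: d :: rest) = (n, d) :: chunkPairs rest from rfl]
    simp only [noteTimeGo, if_pos hi, if_neg hi1]
    by_cases hn : ((NOTE_TO_FREQ_MAPPING.map Prod.fst).contains n) = true
    · have hlen := mem_keys_len n hn
      rw [if_neg (by simp only [hn, hlen]; simp)]
      by_cases hd1 : PySem.Str.strIsdigit d = true
      · by_cases hd2 : 0 < (PySem.Int.ofStr? d).getD 0
        · rw [if_neg (not_or.mpr ⟨not_not_intro hd1, not_le.mpr hd2⟩)]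
          rw [ih hrest (i + 2) hi2 (acc ++ [(n, (PySem.Int.ofStr? d).getD 0)])]
          have hna : (NOTE_TO_FREQ_MAPPING.any fun kv => kv.1 == n) = true := by
            rw [← contains_eq_any]; exact hn
          simp only [List.all_cons, List.map_cons, hna, hd1, hd2, Bool.true_and,
            decide_true, List.append_assoc, List.singleton_append]
        · rw [if_pos (Or.inr (not_lt.mp hd2))]
          have : ((PySem.Str.strIsdigit d && decide (0 < (PySem.Int.ofStr? d).getD 0)) : Bool) = false := by
            simp [hd2]
          simp only [List.all_cons, this, Bool.false_and]
          split_ifs with h1 <;> simp_all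
      · rw [if_pos (Or.inl hd1)]
        have : PySem.Str.strIsdigit d = false := Bool.eq_false_iff.mpr hd1
        simp only [List.all_cons, this, Bool.false_and]
        split_ifs with h1 <;> simp_all
    · rw [if_pos (Or.inl hn)]
      have hna : (NOTE_TO_FREQ_MAPPING.any fun kv => kv.1 == n) = false := by
        rw [← contains_eq_any]; simpa using hn
      simp [List.all_cons, hna]
  | case2 ts h =>
    match ts, h with
    | [], _ => simp [noteTimeGo, chunkPairs]
    | [x], _ => simp at hev
    | x :: y :: rest, h => exact absurd rfl (h x y rest)

-- ===== VERDICT (by name: the statement is the Claim_ definition above) =====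
theorem note_time_list_spec : Claim_equal_note_time_list := by
  intro melody _
  unfold Spec_note_time_list note_time_list note_time_list_alt
  by_cases h : (((PySem.Str.split? melody " ").getD []).filter (fun t => t ≠ "")).length % 2 ≠ 0
  · rw [if_pos h, if_pos h]
  · rw [if_neg h, if_neg h, noteTimeGo_eq _ (not_ne_iff.mp h) 0 rfl []]
    simp only [List.nil_append]
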